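-- pv_equiv track=rewrite | github.com/cz5325/Programmers_Python | 프로그래머스/1/12982. 예산/예산.py | solution
-- ===== SOURCE A (Python) =====
-- def solution(d, budget):
--     cnt = 0  # 지원 가능한 부서의 개수 초기화
--     d.sort()  # 신청 금액을 오름차순으로 정렬
--
--     for i in d:
--         if budget < i:
--             break
--         budget -= i
--         cnt += 1
--
--     return cnt
-- ===== SOURCE B (Python) =====
-- def solution(d, budget):
--     d.sort()
--     prefix = []
--     s = 0
--     for x in d:
--         s += x
--         prefix.append(s)
--     return next((i for i, p in enumerate(prefix) if budget < p), len(prefix))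
-- ===== Notes on version B (the rewrite author's own statement) =====
-- stated objective: alternative
-- what changed: Replaces the early-break loop that mutates the remaining budget and a counter with a prefix-sum table over the sorted amounts followed by a search for the first prefix exceeding the budget.
import Mathlib
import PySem

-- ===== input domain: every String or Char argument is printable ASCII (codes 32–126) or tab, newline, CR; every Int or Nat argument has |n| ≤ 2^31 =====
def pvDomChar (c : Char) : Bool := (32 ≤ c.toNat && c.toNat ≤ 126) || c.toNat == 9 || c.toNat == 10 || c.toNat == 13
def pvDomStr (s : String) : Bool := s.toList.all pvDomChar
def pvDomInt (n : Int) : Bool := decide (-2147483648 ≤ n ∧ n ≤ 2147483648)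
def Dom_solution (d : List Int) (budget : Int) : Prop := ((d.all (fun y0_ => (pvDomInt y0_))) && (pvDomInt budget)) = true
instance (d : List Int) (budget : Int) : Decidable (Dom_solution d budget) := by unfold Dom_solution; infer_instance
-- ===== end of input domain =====

-- B replaces the running-budget early-break loop with a prefix-sum table over the sorted
-- amounts plus a search for the first prefix exceeding the budget; equivalence is about the
-- RETURN value (A sorts d in place; B performs the same sort).
-- ===== PORT A =====
def solutionLoopA : List Int → Int → Int → Int
  | [], _, cnt => cnt
  | i :: rest, budget, cnt =>
      if budget < i then cnt else solutionLoopA rest (budget - i) (cnt + 1)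

def solution (d : List Int) (budget : Int) : Int :=
  solutionLoopA (PySem.List.sorted d (fun x => x)) budget 0

-- ===== PORT B =====
-- prefix-sum table (the for-loop building `prefix` in Source B)
def solutionAccum : Int → List Int → List Int
  | _, [] => []
  | s, x :: xs => (s + x) :: solutionAccum (s + x) xs

-- the generator `next((i for i, p in enumerate(prefix) if budget < p), len(prefix))`
def solutionFirstExceed : List Int → Int → Int
  | [], _ => 0
  | p :: ps, budget => if budget < p then 0 else 1 + solutionFirstExceed ps budget

def solution_alt (d : List Int) (budget : Int) : Int :=
  solutionFirstExceed (solutionAccum 0 (PySem.List.sorted d (fun x => x))) budget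

-- ===== PRECONDITION & SPEC =====
def Spec_solution (d : List Int) (budget : Int) (out : Int) : Prop := out = solution_alt d budget
instance (d : List Int) (budget : Int) (out : Int) : Decidable (Spec_solution d budget out) := by unfold Spec_solution; infer_instance

-- ===== CLAIM (what is proved, stated in full; the proofs are below) =====
def Claim_equal_solution : Prop := ∀ (d : List Int) (budget : Int), Dom_solution d budget → Spec_solution d budget (solution d budget)

-- ===== LEMMAS AND PROOFS =====
theorem solutionLoop_eq_firstExceed (xs : List Int) :
    ∀ (b cnt s : Int), solutionLoopA xs b cnt = cnt + solutionFirstExceed (solutionAccum s xs) (s + b) := by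
  induction xs with
  | nil => intro b cnt s; simp [solutionLoopA, solutionAccum, solutionFirstExceed]
  | cons x xs ih =>
      intro b cnt s
      simp only [solutionLoopA, solutionAccum, solutionFirstExceed]
      by_cases h : b < x
      · rw [if_pos h, if_pos (by omega)]; omega
      · rw [if_neg h, if_neg (by omega), ih (b - x) (cnt + 1) (s + x)]
        have : s + x + (b - x) = s + b := by omega
        rw [this]; omega

-- ===== VERDICT (by name: the statement is the Claim_ definition above) =====
theorem solution_spec : Claim_equal_solution := by
  intro d budget _
  unfold Spec_solution solution solution_alt
  have := solutionLoop_eq_firstExceed (PySem.List.sorted d (fun x => x)) budget 0 0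
  simpa using this
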